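-- pv_equiv track=rewrite | github.com/inch307/DP_EBM | utils.py | category_bin_splits
-- ===== SOURCE A (Python) =====
-- def category_bin_splits(s):
--     x = len(s)
--     lst = []
--     for i in range(1 << x):
--         left = []
--         right = []
--         for j in range(x):
--             if (i & (1 << j)):
--                 left.append(s[j])
--             else:
--                 right.append(s[j])
--         # lst.append([s[j] for j in range(x) if (i & (1 << j))])
--         lst.append([left, right])
--     return lst[:-1]
-- ===== SOURCE B (Python) =====
-- def category_bin_splits(s):
--     # Recursive decomposition: splits of s are built from splits of s[1:],
--     # with s[0] as the fastest-varying choice (first to the right, then to the left).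
--     def rec(t):
--         if not t:
--             return [([], [])]
--         rest = rec(t[1:])
--         return [p for (l, r) in rest for p in ((l, [t[0]] + r), ([t[0]] + l, r))]
--     return [[l, r] for (l, r) in rec(s)][:-1]
-- ===== Notes on version B (the rewrite author's own statement) =====
-- stated objective: alternative
-- what changed: Replaces the bitmask double loop (testing bit j of every counter i) with a structural recursion on the list: splits of a::t are built from splits of t by sending the head right then left, preserving A's enumeration order.
import Mathlib
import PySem

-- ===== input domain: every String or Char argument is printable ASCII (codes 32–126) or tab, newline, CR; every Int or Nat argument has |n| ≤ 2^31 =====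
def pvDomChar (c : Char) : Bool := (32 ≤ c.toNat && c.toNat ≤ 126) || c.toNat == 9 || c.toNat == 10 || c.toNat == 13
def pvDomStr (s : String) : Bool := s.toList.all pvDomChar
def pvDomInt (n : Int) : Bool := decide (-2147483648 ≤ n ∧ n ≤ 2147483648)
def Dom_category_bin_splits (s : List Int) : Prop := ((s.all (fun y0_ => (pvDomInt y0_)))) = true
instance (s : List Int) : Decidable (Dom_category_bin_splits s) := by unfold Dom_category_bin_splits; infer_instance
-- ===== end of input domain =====

-- B replaces A's bitmask double loop by a structural recursion on the list (same cost, different decomposition).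

-- ===== PORT A =====
-- literal port of A: i ranges over range(1 << len(s)); for each i, element s[j] goes
-- left iff bit j of i is set; the last row (all left) is dropped with lst[:-1].
-- j comes from range(x) so j ≥ 0 and 'j.toNat' for the shift amount is exact.
def category_bin_splits (s : List Int) : List (List (List Int)) :=
  let x : Int := (s.length : Int)
  let lst : List (List (List Int)) :=
    (PySem.List.pyRange 0 ((1 : Int) <<< s.length) 1).foldl
      (fun lst i =>
        let lr := (PySem.List.pyRange 0 x 1).foldl
          (fun (lr : List Int × List Int) j =>
            if PySem.Int.band i ((1 : Int) <<< (j.toNat : Int)) ≠ 0 then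
              (lr.1 ++ [PySem.List.pyGetD s j 0], lr.2)
            else
              (lr.1, lr.2 ++ [PySem.List.pyGetD s j 0]))
          ([], [])
        lst ++ [[lr.1, lr.2]])
      []
  PySem.List.slice lst none (some (-1))

-- ===== PORT B =====
-- rec(t): splits of t; for t = a :: tl, each split of tl yields two splits,
-- first with a on the right, then with a on the left (the comprehension in Source B).
def cbsRec (t : List Int) : List (List Int × List Int) :=
  match t with
  | [] => [([], [])]
  | a :: tl => (cbsRec tl).flatMap (fun p => [(p.1, a :: p.2), (a :: p.1, p.2)])

def category_bin_splits_alt (s : List Int) : List (List (List Int)) :=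
  PySem.List.slice ((cbsRec s).map (fun p => [p.1, p.2])) none (some (-1))

-- ===== PRECONDITION & SPEC =====
def Spec_category_bin_splits (s : List Int) (out : List (List (List Int))) : Prop := out = category_bin_splits_alt s
instance (s : List Int) (out : List (List (List Int))) : Decidable (Spec_category_bin_splits s out) := by unfold Spec_category_bin_splits; infer_instance

-- ===== CLAIM (what is proved, stated in full; the proofs are below) =====
def Claim_equal_category_bin_splits : Prop := ∀ (s : List Int), Dom_category_bin_splits s → Spec_category_bin_splits s (category_bin_splits s)

-- ===== LEMMAS AND PROOFS =====

-- closed form of A's inner loop: element at index j goes left iff bit j of i is set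
def lsplitB (t : List Int) (i k : Nat) : List Int × List Int :=
  match t with
  | [] => ([], [])
  | a :: tl =>
      let p := lsplitB tl i (k + 1)
      if i.testBit k then (a :: p.1, p.2) else (p.1, a :: p.2)

theorem one_shiftLeft_int (j : Nat) : (1 : Int) <<< ((j : Nat) : Int) = ((1 <<< j : Nat) : Int) := by
  exact_mod_cast Int.shiftLeft_natCast 1 j

theorem band_pow_ne_zero (k j : Nat) :
    (PySem.Int.band (k : Int) ((1 : Int) <<< ((j : Nat) : Int)) ≠ 0) ↔ k.testBit j := by
  rw [one_shiftLeft_int, PySem.Int.band_natCast, Nat.shiftLeft_eq, one_mul, Nat.and_two_pow]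
  cases h : k.testBit j <;> simp_all

theorem lsplitB_shift (t : List Int) (m k : Nat) :
    lsplitB t m (k + 1) = lsplitB t (m / 2) k := by
  induction t generalizing k with
  | nil => rfl
  | cons a tl ih =>
      simp [lsplitB, ih (k + 1), Nat.testBit_succ]

theorem inner_loop_eq (t : List Int) (j k : Nat) (l r : List Int) :
    (PySem.List.enumerate t (j : Int)).foldl
      (fun (acc : List Int × List Int) (p : Int × Int) =>
        if PySem.Int.band (k : Int) ((1 : Int) <<< (p.1.toNat : Int)) ≠ 0 then
          (acc.1 ++ [p.2], acc.2)
        else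
          (acc.1, acc.2 ++ [p.2])) (l, r)
    = (l ++ (lsplitB t k j).1, r ++ (lsplitB t k j).2) := by
  induction t generalizing j l r with
  | nil => simp [PySem.List.enumerate_nil, lsplitB]
  | cons a tl ih =>
      rw [PySem.List.enumerate_cons]
      have hj1 : (j : Int) + 1 = ((j + 1 : Nat) : Int) := by push_cast; ring
      by_cases hb : k.testBit j
      · simp only [List.foldl_cons, lsplitB]
        rw [if_pos (by simpa [band_pow_ne_zero] using hb), hj1, ih]
        simp [hb]
      · simp only [List.foldl_cons, lsplitB]
        rw [if_neg (by simpa [band_pow_ne_zero] using hb), hj1, ih]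
        simp [hb]

theorem cbsRange_two_mul (m : Nat) :
    List.range (2 * m) = (List.range m).flatMap (fun q => [2 * q, 2 * q + 1]) := by
  induction m with
  | zero => rfl
  | succ m ih =>
      have : 2 * (m + 1) = (2 * m + 1) + 1 := by ring
      rw [this, List.range_succ, List.range_succ, List.range_succ, ih]
      simp

theorem cbsRec_eq_map_range (s : List Int) :
    cbsRec s = (List.range (2 ^ s.length)).map (fun n => lsplitB s n 0) := by
  induction s with
  | nil => rfl
  | cons a tl ih =>
      have hpow : 2 ^ (a :: tl).length = 2 * 2 ^ tl.length := by
        simp [List.length_cons, pow_succ, Nat.mul_comm]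
      rw [show cbsRec (a :: tl) = (cbsRec tl).flatMap
            (fun p => [(p.1, a :: p.2), (a :: p.1, p.2)]) from rfl,
          ih, hpow, cbsRange_two_mul, List.flatMap_map, List.map_flatMap]
      apply List.flatMap_congr
      intro q _
      have h0 : lsplitB (a :: tl) (2 * q) 0
          = ((lsplitB tl q 0).1, a :: (lsplitB tl q 0).2) := by
        simp [lsplitB, lsplitB_shift, Nat.testBit]
      have h1 : lsplitB (a :: tl) (2 * q + 1) 0
          = (a :: (lsplitB tl q 0).1, (lsplitB tl q 0).2) := by
        simp [lsplitB, lsplitB_shift, Nat.testBit, Nat.succ_div]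
      simp [h0, h1]

theorem inner_fold_eq (s : List Int) (k : Nat) :
    (PySem.List.pyRange 0 (s.length : Int) 1).foldl
      (fun (lr : List Int × List Int) j =>
        if PySem.Int.band (k : Int) ((1 : Int) <<< (j.toNat : Int)) ≠ 0 then
          (lr.1 ++ [PySem.List.pyGetD s j 0], lr.2)
        else
          (lr.1, lr.2 ++ [PySem.List.pyGetD s j 0])) ([], [])
    = lsplitB s k 0 := by
  have h2 := List.foldl_map (f := fun j => (j, PySem.List.pyGetD s j 0))
        (g := fun (acc : List Int × List Int) (p : Int × Int) =>
          if PySem.Int.band (k : Int) ((1 : Int) <<< (p.1.toNat : Int)) ≠ 0 then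
            (acc.1 ++ [p.2], acc.2)
          else
            (acc.1, acc.2 ++ [p.2]))
        (l := PySem.List.pyRange 0 (s.length : Int) 1) (init := (([], []) : List Int × List Int))
  simp only at h2
  rw [← h2]
  have he := PySem.List.enumerate_eq_map_pyRange s 0
  simp only [PySem.List.len] at he
  rw [← he]
  simpa using inner_loop_eq s 0 k [] []

theorem shiftLeft_toNat (n : Nat) : ((1 : Int) <<< n).toNat = 2 ^ n := by
  rw [Int.shiftLeft_eq, one_mul,
      show ((2 : Int) ^ n) = ((2 ^ n : Nat) : Int) by push_cast; ring, Int.toNat_natCast]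

theorem lst_eq (s : List Int) :
    category_bin_splits s = category_bin_splits_alt s := by
  simp only [category_bin_splits, category_bin_splits_alt]
  rw [PySem.List.foldl_append_singleton_eq_map]
  simp only [List.nil_append]
  rw [cbsRec_eq_map_range, List.map_map]
  have houter : PySem.List.pyRange 0 ((1 : Int) <<< s.length) 1
      = (List.range (2 ^ s.length)).map (fun k : Nat => ((k : Nat) : Int)) := by
    rw [PySem.List.pyRange_one]
    simp [shiftLeft_toNat]
  rw [houter, List.map_map]
  refine congrArg (fun l => PySem.List.slice l none (some (-1))) ?_
  apply List.map_congr_left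
  intro k hk
  simp only [Function.comp_apply]
  rw [inner_fold_eq s k]

-- ===== VERDICT (by name: the statement is the Claim_ definition above) =====
theorem category_bin_splits_spec : Claim_equal_category_bin_splits := by
  intro s _
  unfold Spec_category_bin_splits
  exact lst_eq s
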